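-- pv_equiv track=rewrite | github.com/marcelpiva/marcelpiva-ptbr-tts-generator | tts_pipeline.py | filter_content
-- ===== SOURCE A (Python) =====
-- def filter_content(items, series=None, season=None, stage=None, puzzle=None):
--     """Filter items by hierarchy: series → season → stage → puzzle."""
--     filtered = items
--     if series:
--         filtered = [i for i in filtered if i.get("series_id") == series]
--     if season:
--         filtered = [i for i in filtered if i.get("season_id") == season]
--     if stage:
--         filtered = [i for i in filtered if i.get("stage_id") == stage]
--     if puzzle:
--         filtered = [i for i in filtered if i.get("puzzle_id") == puzzle]
--     return filtered
-- ===== SOURCE B (Python) =====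
-- def filter_content(items, series=None, season=None, stage=None, puzzle=None):
--     """Filter items by hierarchy: intersect per-filter index sets, then emit
--     the surviving items in their original order."""
--     surviving = set(range(len(items)))
--     for key, val in (("series_id", series), ("season_id", season),
--                      ("stage_id", stage), ("puzzle_id", puzzle)):
--         if val:
--             surviving &= {j for j, it in enumerate(items) if it.get(key) == val}
--     return [it for j, it in enumerate(items) if j in surviving]
-- ===== Notes on version B (the rewrite author's own statement) =====
-- stated objective: alternative
-- what changed: Replaces A's four sequential list-filtering passes with an index-set algorithm: build the set of matching item indices for each active filter, intersect these sets starting from all indices, and emit surviving items in original order.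
import Mathlib
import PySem

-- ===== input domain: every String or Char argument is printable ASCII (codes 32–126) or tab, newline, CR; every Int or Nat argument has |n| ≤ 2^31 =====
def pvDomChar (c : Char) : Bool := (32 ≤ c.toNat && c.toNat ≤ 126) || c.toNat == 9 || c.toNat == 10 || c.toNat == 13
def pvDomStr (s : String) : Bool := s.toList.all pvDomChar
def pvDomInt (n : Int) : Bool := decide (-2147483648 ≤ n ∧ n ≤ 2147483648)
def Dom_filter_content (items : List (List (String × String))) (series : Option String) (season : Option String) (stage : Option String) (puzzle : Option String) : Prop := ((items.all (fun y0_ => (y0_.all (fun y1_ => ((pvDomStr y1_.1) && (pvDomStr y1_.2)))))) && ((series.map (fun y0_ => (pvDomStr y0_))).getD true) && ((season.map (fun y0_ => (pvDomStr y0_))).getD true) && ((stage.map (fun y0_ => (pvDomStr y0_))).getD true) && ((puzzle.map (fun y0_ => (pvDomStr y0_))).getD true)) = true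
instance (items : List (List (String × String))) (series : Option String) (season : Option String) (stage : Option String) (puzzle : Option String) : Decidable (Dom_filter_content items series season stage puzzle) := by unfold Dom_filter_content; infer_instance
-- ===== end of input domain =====

-- B replaces A's four sequential filtering passes with an index-set algorithm:
-- per-filter sets of matching indices are intersected and the survivors emitted in order (objective: alternative).


-- Python truthiness of an optional string: None and "" are falsy.
def pvTruthy : Option String → Bool
  | none => false
  | some s => s ≠ ""

-- i.get(k): first-match lookup in the item's association list (exact for a Python dict).
def pvGet (i : List (String × String)) (k : String) : Option String :=
  (PySem.Dict.mk i).get? k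

-- ===== PORT A =====
def filter_content (items : List (List (String × String))) (series : Option String) (season : Option String) (stage : Option String) (puzzle : Option String) : List (List (String × String)) :=
  let filtered := items
  let filtered := if pvTruthy series then filtered.filter (fun i => pvGet i "series_id" == series) else filtered
  let filtered := if pvTruthy season then filtered.filter (fun i => pvGet i "season_id" == season) else filtered
  let filtered := if pvTruthy stage then filtered.filter (fun i => pvGet i "stage_id" == stage) else filtered
  let filtered := if pvTruthy puzzle then filtered.filter (fun i => pvGet i "puzzle_id" == puzzle) else filtered
  filtered

-- ===== PORT B =====
-- {j for j, it in enumerate(items) if it.get(key) == val}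
def pvMatchIdx (items : List (List (String × String))) (key : String) (val : Option String) : PySem.Set Int :=
  PySem.Set.ofList (((PySem.List.enumerate items 0).filter (fun p => pvGet p.2 key == val)).map (fun p => p.1))

def filter_content_alt (items : List (List (String × String))) (series : Option String) (season : Option String) (stage : Option String) (puzzle : Option String) : List (List (String × String)) :=
  -- surviving = set(range(len(items)))
  let surviving : PySem.Set Int := PySem.Set.ofList (PySem.List.pyRange 0 items.length 1)
  -- for key, val in (...): if val: surviving &= pvMatchIdx …
  let surviving := [("series_id", series), ("season_id", season), ("stage_id", stage), ("puzzle_id", puzzle)].foldl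
    (fun s kv => if pvTruthy kv.2 then PySem.Set.inter s (pvMatchIdx items kv.1 kv.2) else s) surviving
  -- [it for j, it in enumerate(items) if j in surviving]
  ((PySem.List.enumerate items 0).filter (fun p => PySem.Set.contains surviving p.1)).map (fun p => p.2)

-- ===== PRECONDITION & SPEC =====
def Spec_filter_content (items : List (List (String × String))) (series : Option String) (season : Option String) (stage : Option String) (puzzle : Option String) (out : List (List (String × String))) : Prop := out = filter_content_alt items series season stage puzzle
instance (items : List (List (String × String))) (series : Option String) (season : Option String) (stage : Option String) (puzzle : Option String) (out : List (List (String × String))) : Decidable (Spec_filter_content items series season stage puzzle out) := by unfold Spec_filter_content; infer_instance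

-- ===== CLAIM =====
def Claim_equal_filter_content : Prop := ∀ (items : List (List (String × String))) (series : Option String) (season : Option String) (stage : Option String) (puzzle : Option String), Dom_filter_content items series season stage puzzle → Spec_filter_content items series season stage puzzle (filter_content items series season stage puzzle)

-- ===== LEMMAS AND PROOFS =====

-- the combined predicate both algorithms decide, item by item
def pvQ (series season stage puzzle : Option String) (i : List (String × String)) : Bool :=
  (!pvTruthy series || pvGet i "series_id" == series)
  && (!pvTruthy season || pvGet i "season_id" == season)
  && (!pvTruthy stage || pvGet i "stage_id" == stage)
  && (!pvTruthy puzzle || pvGet i "puzzle_id" == puzzle)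

-- A computes items.filter pvQ
theorem pvA_eq_filter (items : List (List (String × String))) (series season stage puzzle : Option String) :
    filter_content items series season stage puzzle = items.filter (pvQ series season stage puzzle) := by
  unfold filter_content pvQ
  cases pvTruthy series <;> cases pvTruthy season <;>
    cases pvTruthy stage <;> cases pvTruthy puzzle <;>
    simp only [Bool.false_eq_true, if_true, if_false,
      List.filter_filter, Bool.not_true, Bool.not_false, Bool.true_or,
      Bool.false_or, Bool.true_and, Bool.and_true] <;>
    first
      | simp
      | (apply List.filter_congr; intro i _;
         cases pvGet i "series_id" == series <;> cases pvGet i "season_id" == season <;>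
           cases pvGet i "stage_id" == stage <;> cases pvGet i "puzzle_id" == puzzle <;> simp)

-- membership in a match-index set, at a genuine index
theorem pv_mem_matchIdx (items : List (List (String × String))) (key : String) (val : Option String)
    (k : Nat) (hk : k < items.length) :
    ((k : Int) ∈ pvMatchIdx items key val) ↔ (pvGet items[k] key == val) = true := by
  unfold pvMatchIdx
  rw [PySem.Set.mem_ofList]
  simp only [List.mem_map, List.mem_filter, PySem.List.mem_enumerate_iff]
  constructor
  · rintro ⟨p, ⟨⟨k', hk', rfl⟩, hmatch⟩, hfst⟩
    simp only [zero_add] at hfst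
    have : k' = k := by exact_mod_cast hfst
    subst this
    exact hmatch
  · intro h
    exact ⟨((k : Int), items[k]), ⟨⟨k, hk, by simp⟩, h⟩, rfl⟩

-- membership in the intersected surviving set
theorem pv_mem_surviving (items : List (List (String × String))) (series season stage puzzle : Option String)
    (k : Nat) (hk : k < items.length) :
    PySem.Set.contains
      ([("series_id", series), ("season_id", season), ("stage_id", stage), ("puzzle_id", puzzle)].foldl
        (fun s kv => if pvTruthy kv.2 then PySem.Set.inter s (pvMatchIdx items kv.1 kv.2) else s)
        (PySem.Set.ofList (PySem.List.pyRange 0 items.length 1)))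
      (k : Int)
    = pvQ series season stage puzzle items[k] := by
  rw [Bool.eq_iff_iff, PySem.Set.contains_iff]
  simp only [List.foldl_cons, List.foldl_nil]
  have hbase : ((k : Int) ∈ PySem.Set.ofList (PySem.List.pyRange 0 items.length 1)) := by
    rw [PySem.Set.mem_ofList, PySem.List.mem_pyRange_one]
    constructor <;> [positivity; exact_mod_cast hk]
  unfold pvQ
  cases pvTruthy series <;> cases pvTruthy season <;>
    cases pvTruthy stage <;> cases pvTruthy puzzle <;>
    simp only [Bool.false_eq_true, if_true, if_false,
      Bool.not_true, Bool.not_false, Bool.true_or, Bool.false_or,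
      Bool.true_and, Bool.and_true, Bool.and_eq_true,
      PySem.Set.mem_inter, pv_mem_matchIdx items _ _ k hk, hbase, true_and]

-- the enumerate/membership comprehension is a filter, provided membership matches the predicate index-wise
theorem pv_enum_filter (s : PySem.Set Int) (q : List (String × String) → Bool) :
    ∀ (items : List (List (String × String))) (start : Int),
      (∀ (k : Nat) (hk : k < items.length), PySem.Set.contains s (start + k) = q items[k]) →
      ((PySem.List.enumerate items start).filter (fun p => PySem.Set.contains s p.1)).map (fun p => p.2)
        = items.filter q := by
  intro items
  induction items with
  | nil => intro start _; rfl
  | cons x xs ih =>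
    intro start h
    rw [PySem.List.enumerate_cons]
    have h0 : PySem.Set.contains s start = q x := by
      have := h 0 (Nat.succ_pos _)
      simpa using this
    have htail : ∀ (k : Nat) (hk : k < xs.length), PySem.Set.contains s (start + 1 + k) = q xs[k] := by
      intro k hk
      have := h (k + 1) (by simpa [List.length_cons] using Nat.succ_lt_succ hk)
      simpa [add_comm, add_left_comm, add_assoc] using this
    simp only [List.filter]
    cases hq : q x with
    | true =>
      simp only [h0, hq, List.map_cons, ih (start + 1) htail]
    | false =>
      simp only [h0, hq, ih (start + 1) htail]

-- B computes items.filter pvQ too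
theorem pvB_eq_filter (items : List (List (String × String))) (series season stage puzzle : Option String) :
    filter_content_alt items series season stage puzzle = items.filter (pvQ series season stage puzzle) := by
  unfold filter_content_alt
  apply pv_enum_filter _ _ items 0
  intro k hk
  simpa using pv_mem_surviving items series season stage puzzle k hk

-- ===== VERDICT =====
theorem filter_content_spec : Claim_equal_filter_content := by
  intro items series season stage puzzle _
  unfold Spec_filter_content
  rw [pvA_eq_filter, pvB_eq_filter]
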